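-- pv_equiv track=rewrite | github.com/GeorgeMentzos/ATAMAN-AuTo-driven-Approximation-and-Microcontroller-AcceleratioN-Toolkit | optimized_mac_perforation.py | cons2
-- ===== SOURCE A (Python) =====
-- def cons2(indices_list):
--     consecutive_or_multiples_of_two_indices = []
--     current_consecutive = []
--     for index in indices_list:
--         if not current_consecutive or index == current_consecutive[-1] + 1:
--             current_consecutive.append(index)
--         else:
--             current_consecutive = [index]
--         if len(current_consecutive) >= 2 and len(current_consecutive) % 2 == 0:
--             consecutive_or_multiples_of_two_indices.extend(current_consecutive)
--             current_consecutive = []  # Reset the current_consecutive list after adding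
--     return consecutive_or_multiples_of_two_indices
-- ===== SOURCE B (Python) =====
-- def cons2(indices_list):
--     # Phase 1: partition into maximal runs of consecutive integers.
--     runs = []
--     for x in indices_list:
--         if runs and x == runs[-1][-1] + 1:
--             runs[-1].append(x)
--         else:
--             runs.append([x])
--     # Phase 2: emit each run trimmed to its largest even prefix length.
--     out = []
--     for run in runs:
--         out.extend(run[: len(run) - len(run) % 2])
--     return out
-- ===== Notes on version B (the rewrite author's own statement) =====
-- stated objective: alternative
-- what changed: Replaces A's interleaved accumulate-and-flush loop by a two-phase structure: one scan partitions the input into maximal consecutive runs, then each run is emitted trimmed to its largest even prefix length.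
import Mathlib
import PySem

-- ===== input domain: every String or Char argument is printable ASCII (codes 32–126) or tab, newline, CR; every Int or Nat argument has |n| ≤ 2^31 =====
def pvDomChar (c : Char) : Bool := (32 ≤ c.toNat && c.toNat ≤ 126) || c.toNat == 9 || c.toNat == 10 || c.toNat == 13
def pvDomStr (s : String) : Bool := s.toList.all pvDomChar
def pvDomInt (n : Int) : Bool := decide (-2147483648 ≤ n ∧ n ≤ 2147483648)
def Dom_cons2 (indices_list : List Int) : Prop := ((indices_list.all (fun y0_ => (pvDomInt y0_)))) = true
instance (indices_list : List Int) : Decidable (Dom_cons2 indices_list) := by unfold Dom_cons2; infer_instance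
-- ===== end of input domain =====

-- B re-decomposes A's interleaved accumulate-and-flush loop into two phases (group into
-- maximal consecutive runs, then emit each run's largest even-length prefix); same cost.

-- ===== PORT A =====
-- one loop iteration: grow/restart current_consecutive, flush it when its length is even
def cons2Step (st : List Int × List Int) (index : Int) : List Int × List Int :=
  let cur : List Int :=
    if st.2 = [] ∨ st.2.getLast? = some (index - 1) then st.2 ++ [index] else [index]
  if 2 ≤ cur.length ∧ cur.length % 2 = 0 then (st.1 ++ cur, []) else (st.1, cur)

def cons2 (indices_list : List Int) : List Int :=
  (indices_list.foldl cons2Step ([], [])).1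

-- ===== PORT B =====
-- phase 1 step: append x to the last run if consecutive, else start a new run
def cons2AltStep (runs : List (List Int)) (x : Int) : List (List Int) :=
  match runs.getLast? with
  | some r => if r.getLast? = some (x - 1) then runs.dropLast ++ [r ++ [x]] else runs ++ [[x]]
  | none => runs ++ [[x]]

-- phase 2: run[: len(run) - len(run) % 2]
def cons2Trim (run : List Int) : List Int := run.take (run.length - run.length % 2)

def cons2_alt (indices_list : List Int) : List Int :=
  (indices_list.foldl cons2AltStep []).foldl (fun out run => out ++ cons2Trim run) []

-- ===== PRECONDITION & SPEC =====
def Spec_cons2 (indices_list : List Int) (out : List Int) : Prop := out = cons2_alt indices_list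
instance (indices_list : List Int) (out : List Int) : Decidable (Spec_cons2 indices_list out) := by unfold Spec_cons2; infer_instance

-- ===== CLAIM (what is proved, stated in full; the proofs are below) =====
def Claim_equal_cons2 : Prop := ∀ (indices_list : List Int), Dom_cons2 indices_list → Spec_cons2 indices_list (cons2 indices_list)

-- ===== LEMMAS AND PROOFS =====

-- reference machine: state = the pending element of A's current run (none = nothing pending)
def cons2M : Option Int → List Int → List Int
  | _, [] => []
  | none, x :: xs => cons2M (some x) xs
  | some p, x :: xs => if p = x - 1 then p :: x :: cons2M none xs else cons2M (some x) xs

-- A's loop with empty / singleton current run equals the reference machine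
theorem cons2_loop (l : List Int) :
    (∀ out : List Int, (l.foldl cons2Step (out, [])).1 = out ++ cons2M none l) ∧
    (∀ out : List Int, ∀ p : Int, (l.foldl cons2Step (out, [p])).1 = out ++ cons2M (some p) l) := by
  induction l with
  | nil => simp [cons2M]
  | cons x xs ih =>
    constructor
    · intro out
      have h : cons2Step (out, ([] : List Int)) x = (out, [x]) := by
        simp [cons2Step]
      simp only [List.foldl_cons, h, ih.2, cons2M]
    · intro out p
      by_cases hp : p = x - 1
      · have h : cons2Step (out, [p]) x = (out ++ [p, x], []) := by
          simp [cons2Step, hp]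
        simp only [List.foldl_cons, h, ih.1, cons2M, if_pos hp, List.append_assoc]
        simp
      · have h : cons2Step (out, [p]) x = (out, [x]) := by
          simp [cons2Step, hp]
        simp only [List.foldl_cons, h, ih.2, cons2M, if_neg hp]

-- the grouping that B's phase-1 fold computes, written as structural recursion on the input
def cons2F (r : List Int) : List Int → List (List Int)
  | [] => [r]
  | x :: xs => if r.getLast? = some (x - 1) then cons2F (r ++ [x]) xs else r :: cons2F [x] xs

theorem cons2_alt_fold (l : List Int) :
    ∀ (R : List (List Int)) (r : List Int),
      l.foldl cons2AltStep (R ++ [r]) = R ++ cons2F r l := by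
  induction l with
  | nil => intro R r; simp [cons2F]
  | cons x xs ih =>
    intro R r
    by_cases hc : r.getLast? = some (x - 1)
    · have h : cons2AltStep (R ++ [r]) x = R ++ [r ++ [x]] := by
        simp [cons2AltStep, hc]
      simp only [List.foldl_cons, h, ih, cons2F, if_pos hc]
    · have h : cons2AltStep (R ++ [r]) x = (R ++ [r]) ++ [[x]] := by
        simp [cons2AltStep, hc]
      rw [List.foldl_cons, h, ih (R ++ [r]) [x]]
      simp [cons2F, if_neg hc]

-- B's phase-2 fold is flatten ∘ map trim
theorem cons2_emit (runs : List (List Int)) :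
    ∀ out : List Int,
      runs.foldl (fun out run => out ++ cons2Trim run) out = out ++ (runs.map cons2Trim).flatten := by
  induction runs with
  | nil => simp
  | cons r rs ih => intro out; simp [ih, List.append_assoc]

theorem cons2Trim_even (r : List Int) (h : r.length % 2 = 0) : cons2Trim r = r := by
  simp [cons2Trim, h]

theorem cons2Trim_odd (r : List Int) (h : r.length % 2 = 1) : cons2Trim r = r.dropLast := by
  simp [cons2Trim, h, List.dropLast_eq_take]

-- emitting the grouped runs equals the reference machine, given the parity of the open run
theorem cons2_dropLast_getLast {a : Type} (l : List a) (y : a) (h : l.getLast? = some y) :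
    l.dropLast ++ [y] = l := by
  obtain ⟨l', rfl⟩ := List.getLast?_eq_some_iff.mp h
  simp

theorem cons2_runs_emit (l : List Int) :
    ∀ (r : List Int) (p : Int), r.getLast? = some p →
      ((cons2F r l).map cons2Trim).flatten =
        if r.length % 2 = 0 then r ++ cons2M none l else r.dropLast ++ cons2M (some p) l := by
  induction l with
  | nil =>
    intro r p hp
    rcases Nat.mod_two_eq_zero_or_one r.length with h | h
    · simp [cons2F, cons2M, h, cons2Trim_even r h]
    · simp [cons2F, cons2M, h, cons2Trim_odd r h]
  | cons x xs ih =>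
    intro r p hp
    have hrne : r ≠ [] := by intro h; rw [h] at hp; simp at hp
    by_cases hc : r.getLast? = some (x - 1)
    · have hpx : p = x - 1 := by rw [hp] at hc; exact Option.some.inj hc
      subst hpx
      have hdl : r.dropLast ++ [x - 1] = r := cons2_dropLast_getLast r _ hc
      have hlast : (r ++ [x]).getLast? = some x := by simp
      rw [cons2F, if_pos hc, ih (r ++ [x]) x hlast]
      have hlen : (r ++ [x]).length = r.length + 1 := by simp
      rw [hlen, List.dropLast_concat]
      rcases Nat.mod_two_eq_zero_or_one r.length with h | h
      · rw [if_neg (by omega : ¬ (r.length + 1) % 2 = 0), if_pos h]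
        simp [cons2M]
      · rw [if_pos (by omega : (r.length + 1) % 2 = 0),
           if_neg (by omega : ¬ r.length % 2 = 0)]
        rw [cons2M, if_pos rfl, ← hdl]
        simp
    · have hne : ¬ p = x - 1 := by intro h; rw [h] at hp; exact hc hp
      have hx := ih [x] x (by simp)
      rw [cons2F, if_neg hc]
      simp only [List.map_cons, List.flatten_cons, hx]
      rcases Nat.mod_two_eq_zero_or_one r.length with h | h
      · rw [if_pos h, cons2Trim_even r h]
        simp [cons2M]
      · rw [if_neg (by omega : ¬ r.length % 2 = 0), cons2Trim_odd r h]
        simp [cons2M, if_neg hne]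

-- ===== VERDICT (by name: the statement is the Claim_ definition above) =====
theorem cons2_spec : Claim_equal_cons2 := by
  intro l _
  unfold Spec_cons2 cons2 cons2_alt
  cases l with
  | nil => rfl
  | cons x xs =>
    have hA := (cons2_loop (x :: xs)).1 []
    rw [hA]
    have h1 : (x :: xs).foldl cons2AltStep [] = cons2F [x] xs := by
      have : cons2AltStep [] x = [] ++ [[x]] := by simp [cons2AltStep]
      simp only [List.foldl_cons, this]
      exact cons2_alt_fold xs [] [x]
    rw [h1, cons2_emit _ []]
    have h2 := cons2_runs_emit xs [x] x (by simp)
    rw [h2]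
    simp [cons2M]
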